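-- pv_equiv track=rewrite | github.com/davmre/sigvisa | signals/mask_util.py | mask_blocks
-- ===== SOURCE A (Python) =====
-- def mask_blocks(mask):
--     """
--     Return a list of masked blocks (contiguous portions of the signal in which the mask is True).
--
--     Throws an IndexError if the mask is False.
--     """
--
--     blocks = []
--     block_start = 0
--
--     try:
--         in_block = mask[0]
--     except:
--         return []
--
--     for i in range(len(mask)):
--         if in_block and not mask[i]:        # end of a block
--             blocks.append((block_start, i))
--             in_block=False
--
--         if not in_block and mask[i]:        # start of a block
--             in_block=True
--             block_start=i
--
--     if in_block: # special case for blocks reaching the end of the mask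
--         blocks.append((block_start, i+1))
--
--     return blocks
-- ===== SOURCE B (Python) =====
-- def mask_blocks(mask):
--     """
--     Return a list of masked blocks (contiguous portions of the signal in which the mask is True).
--     """
--     try:
--         mask[0]
--     except:
--         return []
--     # pass 1: run-length encode the mask into (value, length) runs
--     runs = []
--     cur = bool(mask[0])
--     count = 0
--     for x in mask:
--         b = bool(x)
--         if b == cur:
--             count += 1
--         else:
--             runs.append((cur, count))
--             cur = b
--             count = 1
--     runs.append((cur, count))
--     # pass 2: emit (start, end) for every True run
--     blocks = []
--     i = 0
--     for b, n in runs: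
--         if b:
--             blocks.append((i, i + n))
--         i += n
--     return blocks
-- ===== Notes on version B (the rewrite author's own statement) =====
-- stated objective: alternative
-- what changed: Replaced A's per-index in_block/block_start state machine (with its end-of-block / start-of-block tests and trailing special case) by a two-pass run-length encoding: first group the mask into (value, length) runs, then emit (start, start+length) for each True run.
import Mathlib
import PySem

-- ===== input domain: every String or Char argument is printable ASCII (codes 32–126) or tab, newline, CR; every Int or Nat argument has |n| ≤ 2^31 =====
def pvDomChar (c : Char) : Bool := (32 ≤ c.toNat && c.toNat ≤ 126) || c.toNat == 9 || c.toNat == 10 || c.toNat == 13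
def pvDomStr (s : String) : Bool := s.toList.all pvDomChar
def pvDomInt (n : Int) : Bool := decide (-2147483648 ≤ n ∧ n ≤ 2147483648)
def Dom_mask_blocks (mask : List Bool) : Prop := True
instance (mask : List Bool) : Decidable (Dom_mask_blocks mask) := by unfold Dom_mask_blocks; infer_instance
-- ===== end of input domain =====

-- B replaces A's in_block/block_start state machine by a two-pass run-length
-- encoding (group the mask into runs, then emit (start, start+len) per True run);
-- objective: alternative decomposition, same O(n) cost.

-- ===== PORT A =====
-- loop body of A's 'for i in range(len(mask))': p = (i, mask[i])
def stepA (st : List (Int × Int) × Bool × Int) (p : Int × Bool) : List (Int × Int) × Bool × Int :=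
  -- if in_block and not mask[i]: blocks.append((block_start, i)); in_block = False
  let st1 : List (Int × Int) × Bool :=
    if st.2.1 && !p.2 then (st.1 ++ [(st.2.2, p.1)], false) else (st.1, st.2.1)
  -- if not in_block and mask[i]: in_block = True; block_start = i
  let st2 : Bool × Int := if !st1.2 && p.2 then (true, p.1) else (st1.2, st.2.2)
  (st1.1, st2.1, st2.2)

def mask_blocks (mask : List Bool) : List (Int × Int) :=
  match PySem.List.pyGet? mask 0 with      -- try: in_block = mask[0]  except: return []
  | none => []
  | some b0 =>
    let st := (PySem.List.pyRange 0 (mask.length : Int) 1).foldl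
      (fun st i => stepA st (i, PySem.List.pyGetD mask i false))   -- mask[i]; i is always in range here
      ([], b0, 0)
    -- 'if in_block: blocks.append((block_start, i+1))' where i = len(mask)-1 after the loop
    if st.2.1 then st.1 ++ [(st.2.2, ((mask.length : Int) - 1) + 1)] else st.1

-- ===== PORT B =====
-- pass-1 loop body: run-length-encode state (runs, cur, count), element x
def stepR (st : List (Bool × Nat) × Bool × Nat) (x : Bool) : List (Bool × Nat) × Bool × Nat :=
  if x == st.2.1 then (st.1, st.2.1, st.2.2 + 1)
  else (st.1 ++ [(st.2.1, st.2.2)], x, 1)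

-- pass-2 loop body: emit state (blocks, i), run r = (b, n)
def stepE (st : List (Int × Int) × Int) (r : Bool × Nat) : List (Int × Int) × Int :=
  (if r.1 then st.1 ++ [(st.2, st.2 + (r.2 : Int))] else st.1, st.2 + (r.2 : Int))

def mask_blocks_alt (mask : List Bool) : List (Int × Int) :=
  match PySem.List.pyGet? mask 0 with      -- try: mask[0]  except: return []
  | none => []
  | some b0 =>
    let p := mask.foldl stepR ([], b0, 0)
    let runs := p.1 ++ [(p.2.1, p.2.2)]
    ((runs.foldl stepE ([], 0)).1)

-- ===== PRECONDITION & SPEC =====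
def Spec_mask_blocks (mask : List Bool) (out : List (Int × Int)) : Prop := out = mask_blocks_alt mask
instance (mask : List Bool) (out : List (Int × Int)) : Decidable (Spec_mask_blocks mask out) := by unfold Spec_mask_blocks; infer_instance

-- ===== CLAIM (what is proved, stated in full; the proofs are below) =====
def Claim_equal_mask_blocks : Prop := ∀ (mask : List Bool), Dom_mask_blocks mask → Spec_mask_blocks mask (mask_blocks mask)

-- ===== LEMMAS AND PROOFS =====

-- canonical recursive description of the remaining blocks: state = (start of the
-- current open block, if any; current index), input = rest of the mask
def canon : Option Int → Int → List Bool → List (Int × Int)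
  | none,    _, []         => []
  | some bs, i, []         => [(bs, i)]
  | none,    i, true :: t  => canon (some i) (i+1) t
  | none,    i, false :: t => canon none (i+1) t
  | some bs, i, true :: t  => canon (some bs) (i+1) t
  | some bs, i, false :: t => (bs, i) :: canon none (i+1) t

-- run-length encoding with an open run (b, n)
def runsAux : Bool → Nat → List Bool → List (Bool × Nat)
  | b, n, []     => [(b, n)]
  | b, n, x :: t => if x == b then runsAux b (n+1) t else (b, n) :: runsAux x 1 t

-- A's loop (over the enumerated mask) followed by the trailing append computes canon
theorem lemA (l : List Bool) : ∀ (i : Int) (blocks : List (Int × Int)) (b : Bool) (bs : Int),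
    (let st := (PySem.List.enumerate l i).foldl stepA (blocks, b, bs)
     if st.2.1 then st.1 ++ [(st.2.2, i + l.length)] else st.1)
    = blocks ++ canon (if b then some bs else none) i l := by
  induction l with
  | nil => intro i blocks b bs; cases b <;> simp [PySem.List.enumerate_nil, canon]
  | cons x t ih =>
    intro i blocks b bs
    have hlen : i + ((x :: t).length : Int) = (i + 1) + (t.length : Int) := by
      simp; ring
    cases b <;> cases x <;>
      simp only [PySem.List.enumerate_cons, List.foldl_cons, stepA, canon] <;>
      simp only [Bool.not_true, Bool.not_false, Bool.and_self, Bool.and_false, Bool.and_true,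
        Bool.true_and, Bool.false_and, ite_true, ite_false, reduceIte] <;>
      rw [hlen] <;> rw [ih] <;> simp [canon, List.append_assoc]

-- pass 1 of B (fold + trailing append) computes runsAux
theorem lemR (l : List Bool) : ∀ (runs : List (Bool × Nat)) (cur : Bool) (cnt : Nat),
    (let p := l.foldl stepR (runs, cur, cnt); p.1 ++ [(p.2.1, p.2.2)])
    = runs ++ runsAux cur cnt l := by
  induction l with
  | nil => intro runs cur cnt; simp [runsAux]
  | cons x t ih =>
    intro runs cur cnt
    by_cases h : x = cur <;>
      simp [stepR, runsAux, h, ih, List.append_assoc]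

-- pass 2 of B over runsAux computes canon
theorem lemB (l : List Bool) : ∀ (b : Bool) (n : Nat) (i : Int) (res : List (Int × Int)),
    ((runsAux b n l).foldl stepE (res, i)).1
    = res ++ canon (if b then some i else none) (i + n) l := by
  induction l with
  | nil => intro b n i res; cases b <;> simp [runsAux, stepE, canon]
  | cons x t ih =>
    intro b n i res
    have hc : ∀ (m : Nat), i + ((m : Int) + 1) = (i + (m : Int)) + 1 := by intro m; ring
    by_cases h : x = b
    · subst h
      cases x <;>
        simp only [runsAux, BEq.rfl, ite_true, reduceIte] <;>
        rw [ih] <;>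
        simp only [Nat.cast_add, Nat.cast_one, hc, canon] <;> (try rfl)
    · have hx : (x == b) = false := by simp [h]
      cases b <;> cases x <;> first
        | exact absurd rfl h
        | (simp only [runsAux, hx, ite_false, Bool.false_eq_true, reduceIte,
             List.foldl_cons, stepE]
           rw [ih]
           simp only [Nat.cast_one, canon, List.append_assoc, reduceIte, ite_true, ite_false,
             List.singleton_append, List.nil_append]
           try rfl)

-- ===== VERDICT (by name: the statement is the Claim_ definition above) =====
theorem mask_blocks_spec : Claim_equal_mask_blocks := by
  intro mask _
  unfold Spec_mask_blocks mask_blocks mask_blocks_alt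
  cases mask with
  | nil => simp [PySem.List.pyGet?]
  | cons x t =>
    have hget : PySem.List.pyGet? (x :: t) 0 = some x := by
      simp [PySem.List.pyGet?, PySem.List.pyIdx?]
    rw [hget]
    -- A side: rewrite the pyRange/pyGetD fold as a fold over the enumerated list
    have hen : (PySem.List.pyRange 0 ((x :: t).length : Int) 1).foldl
        (fun st i => stepA st (i, PySem.List.pyGetD (x :: t) i false)) ([], x, 0)
        = (PySem.List.enumerate (x :: t) 0).foldl stepA ([], x, 0) := by
      rw [PySem.List.enumerate_eq_map_pyRange (d := false), List.foldl_map]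
      simp [PySem.List.len_eq]
    simp only []
    rw [hen]
    have hA := lemA (x :: t) 0 [] x 0
    have hend : ((((x :: t).length : Int)) - 1) + 1 = (0 : Int) + ((x :: t).length : Int) := by ring
    rw [hend]
    rw [hA]
    -- B side
    have hR := lemR (x :: t) [] x 0
    simp only [] at hR ⊢
    rw [hR]
    have hB := lemB (x :: t) x 0 0 []
    simp only [Nat.cast_zero, add_zero] at hB
    simp only [List.nil_append] at hB ⊢
    rw [hB]
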